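-- pv_equiv track=rewrite | github.com/MuhammadUsmanGM/Personal-AI-Employee-Hackathon-0 | src/ai_engine/collaboration_engine.py | _suggest_next_actions
-- ===== SOURCE A (Python) =====
-- from typing import Dict, List, Any, Optional, Tuple, Union
--
-- def _suggest_next_actions(user_input: str, user_id: str) -> List[str]:
--     """Suggest next actions based on user input"""
--     # Analyze the input to suggest relevant actions
--     input_lower = user_input.lower()
--
--     suggestions = []
--
--     if any(word in input_lower for word in ['schedule', 'meeting', 'appointment']):
--         suggestions.extend([
--             "Schedule a meeting",
--             "Check calendar availability",
--             "Send meeting invitation"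
--         ])
--     elif any(word in input_lower for word in ['email', 'send', 'message']):
--         suggestions.extend([
--             "Draft email response",
--             "Send email to contacts",
--             "Check email status"
--         ])
--     elif any(word in input_lower for word in ['task', 'todo', 'do']):
--         suggestions.extend([
--             "Create new task",
--             "Update existing task",
--             "Check task status"
--         ])
--     elif any(word in input_lower for word in ['report', 'analytics', 'data']):
--         suggestions.extend([
--             "Generate report",
--             "Analyze data",
--             "Visualize metrics"
--         ])
--     elif any(word in input_lower for word in ['approval', 'approve', 'permission']):
--         suggestions.extend([
--             "Request approval",
--             "Check approval status",
--             "Escalate for approval"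
--         ])
--     else:
--         # General suggestions
--         suggestions.extend([
--             "Clarify requirements",
--             "Provide more details",
--             "Check related tasks",
--             "Consult documentation"
--         ])
--
--     return suggestions[:3]  # Return top 3 suggestions
-- ===== SOURCE B (Python) =====
-- # B: scoring approach -- instead of an ordered if/elif chain, test every keyword
-- # independently against the input and take the best (lowest) category index it
-- # scores; the minimum index equals the first matching group of the chain.
-- KEYWORD_CAT = {
--     'schedule': 0, 'meeting': 0, 'appointment': 0,
--     'email': 1, 'send': 1, 'message': 1,
--     'task': 2, 'todo': 2, 'do': 2,
--     'report': 3, 'analytics': 3, 'data': 3,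
--     'approval': 4, 'approve': 4, 'permission': 4,
-- }
--
-- ACTIONS = [
--     ["Schedule a meeting", "Check calendar availability", "Send meeting invitation"],
--     ["Draft email response", "Send email to contacts", "Check email status"],
--     ["Create new task", "Update existing task", "Check task status"],
--     ["Generate report", "Analyze data", "Visualize metrics"],
--     ["Request approval", "Check approval status", "Escalate for approval"],
--     ["Clarify requirements", "Provide more details", "Check related tasks", "Consult documentation"],
-- ]
--
-- def _suggest_next_actions(user_input: str, user_id: str) -> list:
--     low = user_input.lower()
--     cat = min((c for kw, c in KEYWORD_CAT.items() if kw in low),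
--               default=len(ACTIONS) - 1)
--     return ACTIONS[cat][:3]
-- ===== Notes on version B (the rewrite author's own statement) =====
-- stated objective: alternative
-- what changed: Replaces the ordered if/elif first-match chain by exhaustive scoring: every keyword is tested independently via a flat keyword-to-category map, the minimum matching category index is taken (default = general), and that category's action list is sliced to 3.
import Mathlib
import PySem

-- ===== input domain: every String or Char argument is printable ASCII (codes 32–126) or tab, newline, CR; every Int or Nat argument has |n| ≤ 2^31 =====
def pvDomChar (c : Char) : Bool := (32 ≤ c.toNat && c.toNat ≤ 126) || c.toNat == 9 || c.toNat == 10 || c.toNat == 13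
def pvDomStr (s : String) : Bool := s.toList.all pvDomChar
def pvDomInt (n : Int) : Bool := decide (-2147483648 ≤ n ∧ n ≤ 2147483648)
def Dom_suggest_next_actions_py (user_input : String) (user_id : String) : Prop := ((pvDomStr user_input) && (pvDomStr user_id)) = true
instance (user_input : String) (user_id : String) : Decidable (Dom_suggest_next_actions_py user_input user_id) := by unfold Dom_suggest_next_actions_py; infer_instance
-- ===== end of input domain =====

-- B replaces A's ordered if/elif chain by exhaustive keyword scoring (flat keyword→category map,
-- minimum matching category wins); objective: alternative.

-- ===== PORT A =====
-- literal transliteration of the if/elif chain; `word in input_lower` = PySem.Str.isIn,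
-- suggestions[:3] = PySem.List.slice … none (some 3)
def suggest_next_actions_py (user_input : String) (user_id : String) : List String :=
  let input_lower := PySem.Str.lower user_input
  let suggestions : List String :=
    if ["schedule", "meeting", "appointment"].any (fun word => PySem.Str.isIn word input_lower) then
      ["Schedule a meeting", "Check calendar availability", "Send meeting invitation"]
    else if ["email", "send", "message"].any (fun word => PySem.Str.isIn word input_lower) then
      ["Draft email response", "Send email to contacts", "Check email status"]
    else if ["task", "todo", "do"].any (fun word => PySem.Str.isIn word input_lower) then
      ["Create new task", "Update existing task", "Check task status"]
    else if ["report", "analytics", "data"].any (fun word => PySem.Str.isIn word input_lower) then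
      ["Generate report", "Analyze data", "Visualize metrics"]
    else if ["approval", "approve", "permission"].any (fun word => PySem.Str.isIn word input_lower) then
      ["Request approval", "Check approval status", "Escalate for approval"]
    else
      ["Clarify requirements", "Provide more details", "Check related tasks", "Consult documentation"]
  PySem.List.slice suggestions none (some 3)

-- ===== PORT B =====
-- B's flat keyword → category map (module-level KEYWORD_CAT dict in Source B, insertion order)
def pvKeywordCat : List (String × Int) :=
  [ ("schedule", 0), ("meeting", 0), ("appointment", 0),
    ("email", 1), ("send", 1), ("message", 1),
    ("task", 2), ("todo", 2), ("do", 2),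
    ("report", 3), ("analytics", 3), ("data", 3),
    ("approval", 4), ("approve", 4), ("permission", 4) ]

-- B's ACTIONS table; the last entry (index 5 = len(ACTIONS)-1) is the general fallback
def pvActions : List (List String) :=
  [ ["Schedule a meeting", "Check calendar availability", "Send meeting invitation"],
    ["Draft email response", "Send email to contacts", "Check email status"],
    ["Create new task", "Update existing task", "Check task status"],
    ["Generate report", "Analyze data", "Visualize metrics"],
    ["Request approval", "Check approval status", "Escalate for approval"],
    ["Clarify requirements", "Provide more details", "Check related tasks", "Consult documentation"] ]

-- min((c for kw, c in KEYWORD_CAT.items() if kw in low), default=5) = (matched.min?).getD 5;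
-- cat is always 0..5, so ACTIONS[cat] (pyGet?) is always `some`; the .getD [] arm is unreachable
def suggest_next_actions_py_alt (user_input : String) (user_id : String) : List String :=
  let low := PySem.Str.lower user_input
  let matched := pvKeywordCat.filterMap (fun p => if PySem.Str.isIn p.1 low then some p.2 else none)
  let cat := (matched.min?).getD 5
  PySem.List.slice ((PySem.List.pyGet? pvActions cat).getD []) none (some 3)

-- ===== PRECONDITION & SPEC =====
def Spec_suggest_next_actions_py (user_input : String) (user_id : String) (out : List String) : Prop := out = suggest_next_actions_py_alt user_input user_id
instance (user_input : String) (user_id : String) (out : List String) : Decidable (Spec_suggest_next_actions_py user_input user_id out) := by unfold Spec_suggest_next_actions_py; infer_instance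

-- ===== CLAIM (what is proved, stated in full; the proofs are below) =====
def Claim_equal_suggest_next_actions_py : Prop := ∀ (user_input : String) (user_id : String), Dom_suggest_next_actions_py user_input user_id → Spec_suggest_next_actions_py user_input user_id (suggest_next_actions_py user_input user_id)

-- ===== LEMMAS AND PROOFS =====

theorem pv_foldl_min_eq (k : Int) (xs : List Int) : ∀ (a : Int), (k = a ∨ k ∈ xs) → k ≤ a → (∀ x ∈ xs, k ≤ x) → xs.foldl min a = k := by
  induction xs with
  | nil =>
      intro a h hka _
      simp only [List.foldl_nil]
      rcases h with h | h
      · omega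
      · simp at h
  | cons y ys ih =>
      intro a h hka hle
      simp only [List.foldl_cons]
      have hky : k ≤ y := hle y (by simp)
      rcases h with h | h
      · exact ih (min a y) (Or.inl (by omega)) (by omega) (fun x hx => hle x (by simp [hx]))
      · rcases (List.mem_cons.mp h) with h | h
        · exact ih (min a y) (Or.inl (by omega)) (by omega) (fun x hx => hle x (by simp [hx]))
        · exact ih (min a y) (Or.inr h) (by omega) (fun x hx => hle x (by simp [hx]))

theorem pv_min?_getD_eq (l : List Int) (a k : Int) (hm : k ∈ l) (hle : ∀ x ∈ l, k ≤ x) (hka : k ≤ a) : (l.min?).getD a = k := by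
  cases l with
  | nil => simp at hm
  | cons y ys =>
      simp only [List.min?_cons', Option.getD_some]
      rcases (List.mem_cons.mp hm) with h | h
      · exact pv_foldl_min_eq k ys y (Or.inl h) (hle y (by simp)) (fun x hx => hle x (by simp [hx]))
      · exact pv_foldl_min_eq k ys y (Or.inr h) (hle y (by simp)) (fun x hx => hle x (by simp [hx]))

-- ===== VERDICT (by name: the statement is the Claim_ definition above) =====
theorem suggest_next_actions_py_spec : Claim_equal_suggest_next_actions_py := by
  intro user_input user_id _
  unfold Spec_suggest_next_actions_py suggest_next_actions_py suggest_next_actions_py_alt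
  simp only []
  set low := PySem.Str.lower user_input with hlow
  set matched := pvKeywordCat.filterMap (fun p => if PySem.Str.isIn p.1 low then some p.2 else none) with hmatched
  have hmem : ∀ x ∈ matched, ∃ p ∈ pvKeywordCat, PySem.Str.isIn p.1 low = true ∧ p.2 = x := by
    intro x hx
    rw [hmatched, List.mem_filterMap] at hx
    obtain ⟨p, hp, hf⟩ := hx
    by_cases hb : PySem.Str.isIn p.1 low = true
    · rw [if_pos hb] at hf
      exact ⟨p, hp, hb, Option.some.inj hf⟩
    · rw [if_neg hb] at hf
      simp at hf
  split_ifs with h1 h2 h3 h4 h5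
  all_goals simp only [List.any_cons, List.any_nil, Bool.or_eq_true, Bool.or_false] at h1
  all_goals try simp only [List.any_cons, List.any_nil, Bool.or_eq_true, Bool.or_false] at h2
  all_goals try simp only [List.any_cons, List.any_nil, Bool.or_eq_true, Bool.or_false] at h3
  all_goals try simp only [List.any_cons, List.any_nil, Bool.or_eq_true, Bool.or_false] at h4
  all_goals try simp only [List.any_cons, List.any_nil, Bool.or_eq_true, Bool.or_false] at h5
  · -- category 0
    have hc : (matched.min?).getD 5 = 0 := by
      apply pv_min?_getD_eq
      · rw [hmatched, List.mem_filterMap]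
        rcases h1 with h | h | h
        · exact ⟨("schedule", 0), by simp [pvKeywordCat], by rw [if_pos h]⟩
        · exact ⟨("meeting", 0), by simp [pvKeywordCat], by rw [if_pos h]⟩
        · exact ⟨("appointment", 0), by simp [pvKeywordCat], by rw [if_pos h]⟩
      · intro x hx
        obtain ⟨p, hp, _, hpx⟩ := hmem x hx
        simp [pvKeywordCat] at hp
        rcases hp with hp|hp|hp|hp|hp|hp|hp|hp|hp|hp|hp|hp|hp|hp|hp <;> (rw [hp] at hpx; omega)
      · omega
    rw [hc]; decide
  · -- category 1 (group 0 keywords all absent)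
    push_neg at h1
    have hc : (matched.min?).getD 5 = 1 := by
      apply pv_min?_getD_eq
      · rw [hmatched, List.mem_filterMap]
        rcases h2 with h | h | h
        · exact ⟨("email", 1), by simp [pvKeywordCat], by rw [if_pos h]⟩
        · exact ⟨("send", 1), by simp [pvKeywordCat], by rw [if_pos h]⟩
        · exact ⟨("message", 1), by simp [pvKeywordCat], by rw [if_pos h]⟩
      · intro x hx
        obtain ⟨p, hp, hb, hpx⟩ := hmem x hx
        simp [pvKeywordCat] at hp
        rcases hp with hp|hp|hp|hp|hp|hp|hp|hp|hp|hp|hp|hp|hp|hp|hp <;>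
          first
          | (rw [hp] at hpx; omega)
          | (rw [hp] at hb; simp_all)
      · omega
    rw [hc]; decide
  · -- category 2
    push_neg at h1 h2
    have hc : (matched.min?).getD 5 = 2 := by
      apply pv_min?_getD_eq
      · rw [hmatched, List.mem_filterMap]
        rcases h3 with h | h | h
        · exact ⟨("task", 2), by simp [pvKeywordCat], by rw [if_pos h]⟩
        · exact ⟨("todo", 2), by simp [pvKeywordCat], by rw [if_pos h]⟩
        · exact ⟨("do", 2), by simp [pvKeywordCat], by rw [if_pos h]⟩
      · intro x hx
        obtain ⟨p, hp, hb, hpx⟩ := hmem x hx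
        simp [pvKeywordCat] at hp
        rcases hp with hp|hp|hp|hp|hp|hp|hp|hp|hp|hp|hp|hp|hp|hp|hp <;>
          first
          | (rw [hp] at hpx; omega)
          | (rw [hp] at hb; simp_all)
      · omega
    rw [hc]; decide
  · -- category 3
    push_neg at h1 h2 h3
    have hc : (matched.min?).getD 5 = 3 := by
      apply pv_min?_getD_eq
      · rw [hmatched, List.mem_filterMap]
        rcases h4 with h | h | h
        · exact ⟨("report", 3), by simp [pvKeywordCat], by rw [if_pos h]⟩
        · exact ⟨("analytics", 3), by simp [pvKeywordCat], by rw [if_pos h]⟩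
        · exact ⟨("data", 3), by simp [pvKeywordCat], by rw [if_pos h]⟩
      · intro x hx
        obtain ⟨p, hp, hb, hpx⟩ := hmem x hx
        simp [pvKeywordCat] at hp
        rcases hp with hp|hp|hp|hp|hp|hp|hp|hp|hp|hp|hp|hp|hp|hp|hp <;>
          first
          | (rw [hp] at hpx; omega)
          | (rw [hp] at hb; simp_all)
      · omega
    rw [hc]; decide
  · -- category 4
    push_neg at h1 h2 h3 h4
    have hc : (matched.min?).getD 5 = 4 := by
      apply pv_min?_getD_eq
      · rw [hmatched, List.mem_filterMap]
        rcases h5 with h | h | h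
        · exact ⟨("approval", 4), by simp [pvKeywordCat], by rw [if_pos h]⟩
        · exact ⟨("approve", 4), by simp [pvKeywordCat], by rw [if_pos h]⟩
        · exact ⟨("permission", 4), by simp [pvKeywordCat], by rw [if_pos h]⟩
      · intro x hx
        obtain ⟨p, hp, hb, hpx⟩ := hmem x hx
        simp [pvKeywordCat] at hp
        rcases hp with hp|hp|hp|hp|hp|hp|hp|hp|hp|hp|hp|hp|hp|hp|hp <;>
          first
          | (rw [hp] at hpx; omega)
          | (rw [hp] at hb; simp_all)
      · omega
    rw [hc]; decide
  · -- no keyword matches: matched = [] and the general list is used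
    push_neg at h1 h2 h3 h4 h5
    have hempty : matched = [] := by
      rw [hmatched]
      simp [pvKeywordCat]
      simp_all
    rw [hempty]; decide
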